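-- pv_equiv track=rewrite | github.com/ayukyo/alltoolkit | Python/voting_utils/mod.py | _build_preference_matrix
-- ===== SOURCE A (Python) =====
-- from typing import List, Dict, Tuple, Optional, Set, Any
-- from collections import defaultdict
--
-- def _build_preference_matrix(ballots: List[List[str]],
--                               candidates: List[str]) -> Dict[Tuple[str, str], int]:
--     """构建候选人对决偏好矩阵"""
--     preferences = defaultdict(int)
--
--     for ballot in ballots:
--         for i, c1 in enumerate(ballot):
--             if c1 not in candidates:
--                 continue
--             for j, c2 in enumerate(ballot):
--                 if i >= j or c2 not in candidates:
--                     continue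
--                 # c1 排在 c2 前面
--                 preferences[(c1, c2)] += 1
--
--     return dict(preferences)
-- ===== SOURCE B (Python) =====
-- def _build_preference_matrix(ballots, candidates):
--     cset = set(candidates)
--     preferences = {}
--     for ballot in ballots:
--         # single left-to-right pass: seen[x] = occurrences of x so far in this ballot;
--         # rows groups this ballot's pair counts by left candidate, preserving A's key order
--         rows = {}
--         seen = {}
--         for c in ballot:
--             if c not in cset:
--                 continue
--             for x, m in seen.items():
--                 r = rows.setdefault(x, {})
--                 r[c] = r.get(c, 0) + m
--             seen[c] = seen.get(c, 0) + 1
--         for x, r in rows.items():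
--             for y, cnt in r.items():
--                 preferences[(x, y)] = preferences.get((x, y), 0) + cnt
--     return preferences
-- ===== Notes on version B (the rewrite author's own statement) =====
-- stated objective: faster
-- what changed: B replaces A's nested position-pair scan (with a linear candidate-list membership test at every element) by a single left-to-right pass per ballot keeping a running occurrence tally `seen` and a per-left-candidate grouping dict `rows`, merging the aggregated pair counts into the result once per ballot.
import Mathlib
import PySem

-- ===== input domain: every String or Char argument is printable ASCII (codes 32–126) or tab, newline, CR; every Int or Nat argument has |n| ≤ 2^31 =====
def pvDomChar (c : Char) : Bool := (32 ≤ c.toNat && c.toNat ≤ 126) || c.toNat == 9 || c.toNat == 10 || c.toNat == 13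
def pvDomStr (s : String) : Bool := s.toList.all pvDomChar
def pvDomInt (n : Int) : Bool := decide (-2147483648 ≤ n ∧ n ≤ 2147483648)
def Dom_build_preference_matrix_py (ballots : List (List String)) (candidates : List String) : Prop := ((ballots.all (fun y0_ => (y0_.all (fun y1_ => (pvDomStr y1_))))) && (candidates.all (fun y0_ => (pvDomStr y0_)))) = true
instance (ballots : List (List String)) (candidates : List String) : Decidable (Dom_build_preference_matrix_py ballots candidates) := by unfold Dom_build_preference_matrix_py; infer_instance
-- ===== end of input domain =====

-- B replaces A's nested index-pair scan (candidate-list membership test per element, one increment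
-- per pair) by a single left-to-right pass per ballot with a running tally `seen`, grouping the
-- ballot's aggregated pair counts by left candidate before merging them into the result.

-- ===== PORT A =====
def build_preference_matrix_py (ballots : List (List String)) (candidates : List String) : List (String × String × Int) :=
  let preferences : PySem.Dict (String × String) Int :=
    ballots.foldl (fun prefs ballot =>
      (PySem.List.enumerate ballot).foldl (fun prefs ic =>
        if ¬ (candidates.contains ic.2 = true) then prefs          -- if c1 not in candidates: continue
        else (PySem.List.enumerate ballot).foldl (fun prefs jc =>
          if ic.1 ≥ jc.1 ∨ ¬ (candidates.contains jc.2 = true) then prefs   -- if i >= j or c2 not in candidates: continue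
          else prefs.modify (ic.2, jc.2) 0 (· + 1)) prefs) prefs)  -- preferences[(c1, c2)] += 1
      PySem.Dict.empty
  preferences.items.map (fun p => (p.1.1, p.1.2, p.2))             -- dict(preferences), flattened to triples

-- ===== PORT B =====
def build_preference_matrix_py_alt (ballots : List (List String)) (candidates : List String) : List (String × String × Int) :=
  let cset : PySem.Set String := PySem.Set.ofList candidates       -- cset = set(candidates)
  let preferences : PySem.Dict (String × String) Int :=
    ballots.foldl (fun prefs ballot =>
      let rs :=                                                     -- (rows, seen), built in ONE pass over the ballot
        ballot.foldl (fun rs c =>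
          if ¬ (PySem.Set.contains cset c = true) then rs           -- if c not in cset: continue
          else
            ( rs.2.items.foldl (fun rows xm =>                      -- for x, m in seen.items():
                rows.modify xm.1 PySem.Dict.empty                    --   r = rows.setdefault(x, {})
                  (fun r => r.insert c (r.getD c 0 + xm.2))) rs.1,   --   r[c] = r.get(c, 0) + m
              rs.2.insert c (rs.2.getD c 0 + 1) ))                   -- seen[c] = seen.get(c, 0) + 1
          ((PySem.Dict.empty : PySem.Dict String (PySem.Dict String Int)), (PySem.Dict.empty : PySem.Dict String Int))
      rs.1.items.foldl (fun prefs xr =>                              -- for x, r in rows.items():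
        xr.2.items.foldl (fun prefs yc =>                            --   for y, cnt in r.items():
          prefs.insert (xr.1, yc.1) (prefs.getD (xr.1, yc.1) 0 + yc.2)) prefs) prefs)
      PySem.Dict.empty
  preferences.items.map (fun p => (p.1.1, p.1.2, p.2))

-- ===== PRECONDITION & SPEC =====
def Spec_build_preference_matrix_py (ballots : List (List String)) (candidates : List String) (out : List (String × String × Int)) : Prop := out = build_preference_matrix_py_alt ballots candidates
instance (ballots : List (List String)) (candidates : List String) (out : List (String × String × Int)) : Decidable (Spec_build_preference_matrix_py ballots candidates out) := by unfold Spec_build_preference_matrix_py; infer_instance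

-- ===== CLAIM (what is proved, stated in full; the proofs are below) =====
def Claim_equal_build_preference_matrix_py : Prop := ∀ (ballots : List (List String)) (candidates : List String), Dom_build_preference_matrix_py ballots candidates → Spec_build_preference_matrix_py ballots candidates (build_preference_matrix_py ballots candidates)

-- ===== LEMMAS AND PROOFS =====

-- the canonical weighted-increment fold both per-ballot steps are reduced to
def pvM (d : PySem.Dict (String × String) Int) (s : List ((String × String) × Int)) : PySem.Dict (String × String) Int :=
  s.foldl (fun d p => d.modify p.1 0 (· + p.2)) d

-- per-key weight sum of a sequence
def pvW (s : List ((String × String) × Int)) (q : String × String) : Int :=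
  ((s.filter (fun p => p.1 = q)).map (·.2)).sum

-- A's per-ballot emission sequence: one unit per ordered pair, row-major
def pvSeqA : List String → List ((String × String) × Int)
  | [] => []
  | x :: xs => xs.map (fun y => ((x, y), (1 : Int))) ++ pvSeqA xs

-- the suffix of l strictly after the first occurrence of x ([] if x ∉ l)
def pvAfter (x : String) : List String → List String
  | [] => []
  | y :: ys => if y = x then ys else pvAfter x ys

-- number of pairs (i < j) with l[i] = q.1, l[j] = q.2
def pvP : List String → (String × String) → Int
  | [], _ => 0
  | z :: zs, q => (if q.1 = z then (zs.count q.2 : Int) else 0) + pvP zs q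

-- first-occurrence (lexicographic) order of the pair keys of l
def pvLD : List String → List (String × String)
  | [] => []
  | x :: xs => (PySem.Set.ofList xs).map (fun y => (x, y)) ++ (pvLD xs).filter (fun p => ¬ (p.1 = x))

-- B's per-ballot emission sequence, grouped by left candidate
def pvFKV (l : List String) : List ((String × String) × Int) :=
  (PySem.Set.ofList l.dropLast).flatMap (fun x =>
    (PySem.Set.ofList (pvAfter x l)).map (fun y => ((x, y), pvP l (x, y))))

def pvFK (l : List String) : List (String × String) :=
  (PySem.Set.ofList l.dropLast).flatMap (fun x =>
    (PySem.Set.ofList (pvAfter x l)).map (fun y => (x, y)))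

-- B's one-pass state builder (over the already filtered ballot)
def pvBStep (rs : PySem.Dict String (PySem.Dict String Int) × PySem.Dict String Int) (c : String) :
    PySem.Dict String (PySem.Dict String Int) × PySem.Dict String Int :=
  ( rs.2.items.foldl (fun rows xm =>
      rows.modify xm.1 PySem.Dict.empty (fun r => r.insert c (r.getD c 0 + xm.2))) rs.1,
    rs.2.insert c (rs.2.getD c 0 + 1) )

def pvPass (l : List String) : PySem.Dict String (PySem.Dict String Int) × PySem.Dict String Int :=
  l.foldl pvBStep (PySem.Dict.empty, PySem.Dict.empty)

def pvRow (l : List String) (x : String) : PySem.Dict String Int :=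
  (pvPass l).1.getD x PySem.Dict.empty

-- ===== A-side: per-ballot step = pvM over pvSeqA (via pvPf) =====

def pvPf (d : PySem.Dict (String × String) Int) : List String → PySem.Dict (String × String) Int
  | [] => d
  | x :: xs => pvPf (xs.foldl (fun d c2 => d.modify (x, c2) 0 (· + 1)) d) xs

def pvRecH (h : String → List String → PySem.Dict (String × String) Int → PySem.Dict (String × String) Int)
    (d : PySem.Dict (String × String) Int) : List String → PySem.Dict (String × String) Int
  | [] => d
  | x :: xs => pvRecH h (h x xs d) xs

def pvHA (cands : List String) (c1 : String) (l : List String)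
    (d : PySem.Dict (String × String) Int) : PySem.Dict (String × String) Int :=
  if ¬ (cands.contains c1 = true) then d
  else l.foldl (fun d c2 => if ¬ (cands.contains c2 = true) then d else d.modify (c1, c2) 0 (· + 1)) d

theorem pvGen (h : String → List String → PySem.Dict (String × String) Int → PySem.Dict (String × String) Int) :
    ∀ (suf pre : List String) (d : PySem.Dict (String × String) Int),
      (PySem.List.enumerate suf (pre.length : Int)).foldl
          (fun d ic => h ic.2 ((pre ++ suf).drop (ic.1 + 1).toNat) d) d
        = pvRecH h d suf := by
  intro suf
  induction suf with
  | nil => intro pre d; simp [pvRecH, PySem.List.enumerate_nil]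
  | cons x xs ih =>
    intro pre d
    simp only [PySem.List.enumerate_cons, List.foldl_cons]
    have hx : ((pre ++ x :: xs).drop ((pre.length : Int) + 1).toNat) = xs := by
      have h1 : (pre ++ x :: xs) = (pre ++ [x]) ++ xs := by simp
      have h2 : ((pre.length : Int) + 1).toNat = (pre ++ [x]).length := by simp
      rw [h1, h2, List.drop_left]
    rw [hx]
    show List.foldl _ (h x xs d) (PySem.List.enumerate xs ((pre.length : Int) + 1)) = pvRecH h (h x xs d) xs
    have e := ih (pre ++ [x]) (h x xs d)
    have h3 : ((pre ++ [x]).length : Int) = (pre.length : Int) + 1 := by simp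
    have h4 : (pre ++ [x]) ++ xs = pre ++ x :: xs := by simp
    rw [h3, h4] at e
    exact e

theorem pvE1 (cands : List String) (i : Int) (c1 : String) :
    ∀ (l : List String) (s : Int) (d : PySem.Dict (String × String) Int), 0 ≤ s →
      (PySem.List.enumerate l s).foldl
          (fun d jc => if i ≥ jc.1 ∨ ¬ (cands.contains jc.2 = true) then d
                       else d.modify (c1, jc.2) 0 (· + 1)) d
        = (l.drop (i + 1 - s).toNat).foldl
            (fun d c2 => if ¬ (cands.contains c2 = true) then d
                         else d.modify (c1, c2) 0 (· + 1)) d := by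
  intro l
  induction l with
  | nil => intro s d _; simp [PySem.List.enumerate_nil]
  | cons x xs ih =>
    intro s d hs
    simp only [PySem.List.enumerate_cons, List.foldl_cons]
    by_cases hcase : i ≥ s
    · rw [if_pos (Or.inl hcase)]
      rw [ih (s + 1) d (by omega)]
      have ht : (i + 1 - s).toNat = (i + 1 - (s + 1)).toNat + 1 := by omega
      rw [ht, List.drop_succ_cons]
    · have hiff : (i ≥ s ∨ ¬ (cands.contains x = true)) ↔ ¬ (cands.contains x = true) := by tauto
      rw [if_congr hiff rfl rfl]
      have h1 : (i + 1 - s).toNat = 0 := by omega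
      rw [h1, List.drop_zero, List.foldl_cons]
      have e := ih (s + 1) (if ¬ (cands.contains x = true) then d else d.modify (c1, x) 0 (· + 1)) (by omega)
      have h2 : (i + 1 - (s + 1)).toNat = 0 := by omega
      rw [h2, List.drop_zero] at e
      exact e

theorem pvRecHA (cands : List String) :
    ∀ (ballot : List String) (d : PySem.Dict (String × String) Int),
      pvRecH (pvHA cands) d ballot = pvPf d (ballot.filter (fun c => cands.contains c)) := by
  intro ballot
  induction ballot with
  | nil => intro d; simp [pvRecH, pvPf]
  | cons x xs ih =>
    intro d
    show pvRecH (pvHA cands) (pvHA cands x xs d) xs = _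
    rw [ih]
    by_cases hv : cands.contains x = true
    · have hA : pvHA cands x xs d
          = (xs.filter (fun c => cands.contains c)).foldl (fun d c2 => d.modify (x, c2) 0 (· + 1)) d := by
        unfold pvHA
        rw [if_neg (not_not_intro hv)]
        simp only [ite_not]
        rw [PySem.List.foldl_ite_eq_foldl_filter (fun c2 => cands.contains c2 = true)
            (fun d c2 => d.modify (x, c2) 0 (· + 1)) xs d]
        simp
      rw [hA, List.filter_cons_of_pos hv]
      rfl
    · have hA : pvHA cands x xs d = d := by unfold pvHA; rw [if_pos hv]
      rw [hA, List.filter_cons_of_neg (by simpa using hv)]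

theorem pvStepA (cands : List String) (ballot : List String) (d : PySem.Dict (String × String) Int) :
    (PySem.List.enumerate ballot).foldl (fun prefs ic =>
        if ¬ (cands.contains ic.2 = true) then prefs
        else (PySem.List.enumerate ballot).foldl (fun prefs jc =>
          if ic.1 ≥ jc.1 ∨ ¬ (cands.contains jc.2 = true) then prefs
          else prefs.modify (ic.2, jc.2) 0 (· + 1)) prefs) d
      = pvPf d (ballot.filter (fun c => cands.contains c)) := by
  have hstep : (fun (prefs : PySem.Dict (String × String) Int) (ic : Int × String) =>
        if ¬ (cands.contains ic.2 = true) then prefs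
        else (PySem.List.enumerate ballot).foldl (fun prefs jc =>
          if ic.1 ≥ jc.1 ∨ ¬ (cands.contains jc.2 = true) then prefs
          else prefs.modify (ic.2, jc.2) 0 (· + 1)) prefs)
      = (fun prefs ic => pvHA cands ic.2 (ballot.drop (ic.1 + 1).toNat) prefs) := by
    funext prefs ic
    unfold pvHA
    by_cases hv : cands.contains ic.2 = true
    · rw [if_neg (not_not_intro hv), if_neg (not_not_intro hv)]
      have e := pvE1 cands ic.1 ic.2 ballot 0 prefs le_rfl
      rw [sub_zero] at e
      exact e
    · rw [if_pos hv, if_pos hv]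
  rw [hstep]
  have g := pvGen (pvHA cands) ballot [] d
  simp only [List.length_nil, Nat.cast_zero, List.nil_append] at g
  rw [g]
  exact pvRecHA cands ballot d

theorem pvM_append (d : PySem.Dict (String × String) Int) (u v : List ((String × String) × Int)) :
    pvM d (u ++ v) = pvM (pvM d u) v := by
  unfold pvM; rw [List.foldl_append]

theorem pvPf_eq_M (l : List String) : ∀ d, pvPf d l = pvM d (pvSeqA l) := by
  induction l with
  | nil => intro d; rfl
  | cons x xs ih =>
    intro d
    show pvPf (xs.foldl (fun d c2 => d.modify (x, c2) 0 (· + 1)) d) xs = _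
    rw [ih]
    show _ = pvM d (xs.map (fun y => ((x, y), (1 : Int))) ++ pvSeqA xs)
    rw [pvM_append]
    congr 1
    unfold pvM
    rw [List.foldl_map]

-- ===== generic facts about pvM =====

theorem pvM_keys (d : PySem.Dict (String × String) Int) (s : List ((String × String) × Int)) :
    (pvM d s).keys = PySem.Set.update d.keys (s.map (·.1)) := by
  unfold pvM
  exact PySem.Dict.keys_foldl_modify_key s (·.1) 0 (fun _ p => (· + p.2)) d

theorem pvM_nodup (d : PySem.Dict (String × String) Int) (s : List ((String × String) × Int))
    (h : d.keys.Nodup) : (pvM d s).keys.Nodup := by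
  unfold pvM
  exact PySem.Dict.nodup_keys_foldl_modify_key s (·.1) 0 (fun _ p => (· + p.2)) d h

theorem pvW_cons (p : (String × String) × Int) (s : List ((String × String) × Int)) (q : String × String) :
    pvW (p :: s) q = (if p.1 = q then p.2 else 0) + pvW s q := by
  unfold pvW
  by_cases h : p.1 = q
  · rw [List.filter_cons_of_pos (by simpa using h), if_pos h]
    simp
  · rw [List.filter_cons_of_neg (by simpa using h), if_neg h]
    simp

theorem pvW_append (u v : List ((String × String) × Int)) (q : String × String) :
    pvW (u ++ v) q = pvW u q + pvW v q := by
  unfold pvW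
  rw [List.filter_append, List.map_append, List.sum_append]

theorem pvM_getD (s : List ((String × String) × Int)) :
    ∀ (d : PySem.Dict (String × String) Int) (q : String × String),
      (pvM d s).getD q 0 = d.getD q 0 + pvW s q := by
  induction s with
  | nil => intro d q; simp [pvM, pvW]
  | cons p rest ih =>
    intro d q
    show (pvM (d.modify p.1 0 (· + p.2)) rest).getD q 0 = _
    rw [ih, pvW_cons, PySem.Dict.getD_modify]
    by_cases h : q = p.1
    · rw [if_pos h, if_pos h.symm, h]; ring
    · rw [if_neg h, if_neg (fun hc => h hc.symm)]; ring

theorem pvUpdate_ofList (s : PySem.Set (String × String)) (xs : List (String × String)) :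
    PySem.Set.update s (PySem.Set.ofList xs) = PySem.Set.update s xs := by
  rw [PySem.Set.update_eq_append_filter, PySem.Set.update_eq_append_filter, PySem.Set.ofList_ofList]

-- the aggregation lemma: pvM only depends on the first-occurrence key order and the per-key sums
theorem pvAgg (d : PySem.Dict (String × String) Int) (s1 s2 : List ((String × String) × Int))
    (h : d.keys.Nodup)
    (hk : PySem.Set.ofList (s1.map (·.1)) = PySem.Set.ofList (s2.map (·.1)))
    (hw : ∀ q, pvW s1 q = pvW s2 q) : pvM d s1 = pvM d s2 := by
  apply PySem.Dict.ext
  have hkeys : (pvM d s1).keys = (pvM d s2).keys := by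
    rw [pvM_keys, pvM_keys, ← pvUpdate_ofList d.keys (s1.map (·.1)),
        ← pvUpdate_ofList d.keys (s2.map (·.1)), hk]
  rw [PySem.Dict.items_eq_map_keys _ (pvM_nodup d s1 h) 0,
      PySem.Dict.items_eq_map_keys _ (pvM_nodup d s2 h) 0, hkeys]
  exact List.map_congr_left (fun k _ => by rw [pvM_getD, pvM_getD, hw k])

-- ===== A-side key order and sums =====

theorem pvFilterNodup {α : Type} [DecidableEq α] (a : α) :
    ∀ (s : List α), s.Nodup → s.filter (fun k => decide (k = a)) = if a ∈ s then [a] else [] := by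
  intro s
  induction s with
  | nil => intro _; simp
  | cons y ys ih =>
    intro hnd
    have hy : y ∉ ys := (List.nodup_cons.mp hnd).1
    have hih := ih (List.nodup_cons.mp hnd).2
    by_cases h : y = a
    · subst h
      simp [hih, hy]
    · simp [h, hih, Ne.symm h]

theorem pvW_row (x : String) (xs : List String) (q : String × String) :
    pvW (xs.map (fun y => ((x, y), (1 : Int)))) q
      = if q.1 = x then (xs.count q.2 : Int) else 0 := by
  induction xs with
  | nil => simp [pvW]
  | cons y ys ih =>
    rw [List.map_cons, pvW_cons, ih]
    by_cases h1 : q.1 = x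
    · by_cases h2 : y = q.2
      · have : ((x, y) : String × String) = q := by
          cases q; simp_all
        rw [if_pos this, if_pos h1, if_pos h1]
        simp [h2]
        omega
      · have : ¬ (((x, y) : String × String) = q) := by
          cases q; simp_all [eq_comm]
        rw [if_neg this, if_pos h1, if_pos h1]
        have : (y == q.2) = false := by simpa using h2
        simp [List.count_cons, this]
    · have : ¬ (((x, y) : String × String) = q) := by
        cases q; intro hc; apply h1; cases hc; rfl
      rw [if_neg this, if_neg h1, if_neg h1]
      ring

theorem pvW_seqA (l : List String) (q : String × String) : pvW (pvSeqA l) q = pvP l q := by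
  induction l with
  | nil => simp [pvW, pvSeqA, pvP]
  | cons x xs ih =>
    show pvW (xs.map (fun y => ((x, y), (1 : Int))) ++ pvSeqA xs) q = _
    rw [pvW_append, pvW_row, ih]
    rfl

-- Set.ofList through an injective pair-tagging map
theorem pvOfListMapPair (x : String) (u : List String) :
    PySem.Set.ofList (u.map (fun y => (x, y))) = (PySem.Set.ofList u).map (fun y => (x, y)) := by
  induction u using List.reverseRecOn with
  | nil => rfl
  | append_singleton v a ih =>
    rw [List.map_append, List.map_singleton, PySem.Set.ofList_append_singleton,
        PySem.Set.ofList_append_singleton, ih, PySem.Set.add_eq_ite, PySem.Set.add_eq_ite]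
    by_cases h : a ∈ PySem.Set.ofList v
    · rw [if_pos (List.mem_map_of_mem h), if_pos h]
    · rw [if_neg (by
        intro hc
        obtain ⟨b, hb, hbe⟩ := List.mem_map.mp hc
        cases hbe
        exact h hb), if_neg h, List.map_append]
      rfl

theorem pvLD_memSnd : ∀ (l : List String) (p : String × String), p ∈ pvLD l → p.2 ∈ l := by
  intro l
  induction l with
  | nil => intro p hp; simp [pvLD] at hp
  | cons x xs ih =>
    intro p hp
    rcases List.mem_append.mp hp with h | h
    · obtain ⟨y, hy, he⟩ := List.mem_map.mp h
      cases he
      exact List.mem_cons_of_mem x ((PySem.Set.mem_ofList xs y).mp hy)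
    · exact List.mem_cons_of_mem x (ih p (List.mem_of_mem_filter h))

theorem pvSeqA_keys (l : List String) : PySem.Set.ofList ((pvSeqA l).map (·.1)) = pvLD l := by
  induction l with
  | nil => rfl
  | cons x xs ih =>
    show PySem.Set.ofList ((xs.map (fun y => ((x, y), (1 : Int))) ++ pvSeqA xs).map (·.1)) = _
    rw [List.map_append, PySem.Set.ofList_append, PySem.Set.update_eq_append_filter, ih]
    have hmap : ((xs.map (fun y => ((x, y), (1 : Int)))).map (·.1)) = xs.map (fun y => (x, y)) := by
      rw [List.map_map]; rfl
    rw [hmap, pvOfListMapPair]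
    show _ = (PySem.Set.ofList xs).map (fun y => (x, y)) ++ (pvLD xs).filter (fun p => ¬ (p.1 = x))
    congr 1
    apply List.filter_congr
    intro p hp
    have hsnd : p.2 ∈ xs := pvLD_memSnd xs p hp
    by_cases hfst : p.1 = x
    · have hmem : p ∈ (PySem.Set.ofList xs).map (fun y => (x, y)) :=
        List.mem_map.mpr ⟨p.2, (PySem.Set.mem_ofList xs p.2).mpr hsnd, by rw [← hfst]⟩
      have hcx : PySem.Set.contains ((PySem.Set.ofList xs).map (fun y => (x, y))) p = true :=
        (PySem.Set.contains_iff _ _).mpr hmem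
      rw [hcx]
      simp [hfst]
    · have hnmem : p ∉ (PySem.Set.ofList xs).map (fun y => (x, y)) := by
        intro hc
        obtain ⟨y, _, he⟩ := List.mem_map.mp hc
        exact hfst (by rw [← he])
      have hcx : PySem.Set.contains ((PySem.Set.ofList xs).map (fun y => (x, y))) p = false := by
        rw [← Bool.not_eq_true]
        exact fun hcc => hnmem ((PySem.Set.contains_iff _ _).mp hcc)
      rw [hcx]
      simp [hfst]

-- ===== B-side pass characterization =====

theorem pvPass_snd : ∀ (l : List String) (rs : PySem.Dict String (PySem.Dict String Int) × PySem.Dict String Int),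
    (l.foldl pvBStep rs).2 = l.foldl (fun s c => s.insert c (s.getD c 0 + 1)) rs.2 := by
  intro l
  induction l with
  | nil => intro rs; rfl
  | cons c cs ih => intro rs; rw [List.foldl_cons, List.foldl_cons, ih]; rfl

theorem pvPass_snd_counter (l : List String) : (pvPass l).2 = PySem.Dict.counter l := by
  unfold pvPass
  rw [pvPass_snd, PySem.Dict.foldl_insert_getD_add_one_eq_counter]

theorem pvGF0 (c x : String) :
    ∀ (ps : List (String × Int)) (Rd : PySem.Dict String (PySem.Dict String Int)),
      x ∉ ps.map (·.1) →
      (ps.foldl (fun rows xm =>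
          rows.modify xm.1 PySem.Dict.empty (fun r => r.insert c (r.getD c 0 + xm.2))) Rd).getD x PySem.Dict.empty
        = Rd.getD x PySem.Dict.empty := by
  intro ps
  induction ps with
  | nil => intro Rd _; rfl
  | cons p rest ih =>
    intro Rd hx
    rw [List.map_cons, List.mem_cons] at hx
    push_neg at hx
    rw [List.foldl_cons, ih _ hx.2, PySem.Dict.getD_modify, if_neg hx.1]

theorem pvGF1 (c x : String) (m : Int) :
    ∀ (ps : List (String × Int)) (Rd : PySem.Dict String (PySem.Dict String Int)),
      (ps.map (·.1)).Nodup → (x, m) ∈ ps →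
      (ps.foldl (fun rows xm =>
          rows.modify xm.1 PySem.Dict.empty (fun r => r.insert c (r.getD c 0 + xm.2))) Rd).getD x PySem.Dict.empty
        = (Rd.getD x PySem.Dict.empty).insert c ((Rd.getD x PySem.Dict.empty).getD c 0 + m) := by
  intro ps
  induction ps with
  | nil => intro Rd _ hm; simp at hm
  | cons p rest ih =>
    intro Rd hnd hm
    rw [List.map_cons, List.nodup_cons] at hnd
    rw [List.foldl_cons]
    rcases List.mem_cons.mp hm with he | hr
    · have hx : p.1 = x := by rw [← he]
      have hxr : x ∉ rest.map (·.1) := by rw [← hx]; exact hnd.1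
      rw [pvGF0 c x rest _ hxr, PySem.Dict.getD_modify, if_pos hx.symm, hx, ← he]
    · have hpx : p.1 ≠ x := by
        intro hc
        exact hnd.1 (hc ▸ (List.mem_map.mpr ⟨(x, m), hr, hc ▸ rfl⟩))
      rw [ih _ hnd.2 hr, PySem.Dict.getD_modify, if_neg (fun hc => hpx hc.symm)]

theorem pvRowStep (l : List String) (c x : String) :
    pvRow (l ++ [c]) x
      = if x ∈ l then (pvRow l x).insert c ((pvRow l x).getD c 0 + (l.count x : Int)) else pvRow l x := by
  unfold pvRow pvPass
  rw [List.foldl_append, List.foldl_cons, List.foldl_nil]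
  show (pvBStep (pvPass l) c).1.getD x PySem.Dict.empty = _
  unfold pvBStep
  rw [pvPass_snd_counter]
  by_cases h : x ∈ l
  · rw [if_pos h]
    have hnd : ((PySem.Dict.counter l).items.map (·.1)).Nodup := by
      rw [show ((PySem.Dict.counter l).items.map (·.1)) = (PySem.Dict.counter l).keys from rfl,
          PySem.Dict.keys_counter]
      exact PySem.Set.nodup_ofList l
    have hmem : (x, (l.count x : Int)) ∈ (PySem.Dict.counter l).items := by
      rw [PySem.Dict.items_counter]
      exact List.mem_map.mpr ⟨x, (PySem.Set.mem_ofList l x).mpr h, rfl⟩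
    exact pvGF1 c x (l.count x) _ _ hnd hmem
  · rw [if_neg h]
    apply pvGF0
    rw [show ((PySem.Dict.counter l).items.map (·.1)) = (PySem.Dict.counter l).keys from rfl,
        PySem.Dict.keys_counter]
    intro hc
    exact h ((PySem.Set.mem_ofList l x).mp hc)

theorem pvAfter_mem (x : String) : ∀ (l : List String) (y : String), y ∈ pvAfter x l → y ∈ l := by
  intro l
  induction l with
  | nil => intro y hy; simp [pvAfter] at hy
  | cons z zs ih =>
    intro y hy
    unfold pvAfter at hy
    by_cases h : z = x
    · rw [if_pos h] at hy; exact List.mem_cons_of_mem z hy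
    · rw [if_neg h] at hy; exact List.mem_cons_of_mem z (ih y hy)

theorem pvAfter_nil_of_not_mem (x : String) : ∀ (l : List String), x ∉ l → pvAfter x l = [] := by
  intro l
  induction l with
  | nil => intro _; rfl
  | cons z zs ih =>
    intro h
    unfold pvAfter
    rw [List.mem_cons] at h
    push_neg at h
    rw [if_neg (fun hc => h.1 hc.symm)]
    exact ih h.2

theorem pvAfter_append (x c : String) :
    ∀ (l : List String), pvAfter x (l ++ [c]) = if x ∈ l then pvAfter x l ++ [c] else [] := by
  intro l
  induction l with
  | nil =>
    simp only [List.nil_append, List.not_mem_nil, if_neg (fun h => h)]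
    unfold pvAfter
    split <;> rfl
  | cons z zs ih =>
    show pvAfter x (z :: (zs ++ [c])) = _
    unfold pvAfter
    by_cases h : z = x
    · rw [if_pos h, if_pos (by rw [h]; exact List.mem_cons_self), if_pos h]
    · rw [if_neg h, ih]
      by_cases hm : x ∈ zs
      · rw [if_pos hm, if_pos (List.mem_cons_of_mem z hm), if_neg h]
      · rw [if_neg hm, if_neg (by
          rw [List.mem_cons]
          push_neg
          exact ⟨fun hc => h hc.symm, hm⟩)]

theorem pvRow_keys (x : String) : ∀ (l : List String),
    (pvRow l x).keys = PySem.Set.ofList (pvAfter x l) := by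
  intro l
  induction l using List.reverseRecOn with
  | nil => rfl
  | append_singleton u c ih =>
    rw [pvRowStep, pvAfter_append]
    by_cases h : x ∈ u
    · rw [if_pos h, if_pos h, PySem.Set.ofList_append_singleton, ← ih, PySem.Set.add_eq_ite]
      by_cases hc : (pvRow u x).contains c = true
      · rw [PySem.Dict.keys_insert_of_contains _ _ hc, if_pos ((PySem.Dict.contains_iff_mem_keys _ _).mp hc)]
      · rw [PySem.Dict.keys_insert_of_not_contains _ _ (by simpa using hc),
            if_neg (fun hm => (by simpa using hc : ¬ _) ((PySem.Dict.contains_iff_mem_keys _ _).mpr hm))]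
    · rw [if_neg h, if_neg h, ih, pvAfter_nil_of_not_mem x u h]

theorem pvP_append (c : String) (q : String × String) :
    ∀ (l : List String), pvP (l ++ [c]) q = pvP l q + (if q.2 = c then (l.count q.1 : Int) else 0) := by
  intro l
  induction l with
  | nil =>
    show pvP [c] q = _
    unfold pvP
    simp only [List.count_nil]
    split_ifs <;> simp [pvP]
  | cons z zs ih =>
    show pvP (z :: (zs ++ [c])) q = _
    unfold pvP
    rw [ih]
    have hcnt : ((zs ++ [c]).count q.2 : Int) = (zs.count q.2 : Int) + (if q.2 = c then 1 else 0) := by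
      have hn : (zs ++ [c]).count q.2 = zs.count q.2 + (if q.2 = c then 1 else 0) := by
        rw [List.count_append, List.count_singleton]
        by_cases h : q.2 = c
        · simp [h]
        · simp [h, Ne.symm h]
      rw [hn]
      push_cast
      split_ifs <;> simp
    have hcnt2 : (((z :: zs).count q.1 : Int)) = (zs.count q.1 : Int) + (if q.1 = z then 1 else 0) := by
      have hn : (z :: zs).count q.1 = zs.count q.1 + (if q.1 = z then 1 else 0) := by
        rw [List.count_cons]
        by_cases h : q.1 = z
        · simp [h]
        · simp [h, Ne.symm h]
      rw [hn]
      push_cast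
      split_ifs <;> simp
    rw [hcnt, hcnt2]
    split_ifs <;> ring

theorem pvRow_getD (x y : String) : ∀ (l : List String),
    (pvRow l x).getD y 0 = pvP l (x, y) := by
  intro l
  induction l using List.reverseRecOn with
  | nil => simp [pvRow, pvPass, pvP, PySem.Dict.getD_empty]
  | append_singleton u c ih =>
    rw [pvRowStep, pvP_append c (x, y) u]
    by_cases h : x ∈ u
    · rw [if_pos h, PySem.Dict.getD_insert]
      by_cases hy : y = c
      · subst hy
        rw [if_pos rfl, ih]
        simp
      · rw [if_neg hy, ih]
        simp [hy]
    · rw [if_neg h, ih]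
      simp [List.count_eq_zero.mpr h]

theorem pvPass_fst_keys : ∀ (l : List String),
    (pvPass l).1.keys = PySem.Set.ofList l.dropLast := by
  intro l
  induction l using List.reverseRecOn with
  | nil => rfl
  | append_singleton u c ih =>
    unfold pvPass
    rw [List.foldl_append, List.foldl_cons, List.foldl_nil]
    show (pvBStep (pvPass u) c).1.keys = _
    unfold pvBStep
    rw [pvPass_snd_counter]
    have hk := PySem.Dict.keys_foldl_modify_key (PySem.Dict.counter u).items (·.1) PySem.Dict.empty
      (fun _ xm => (fun r => r.insert c (r.getD c 0 + xm.2))) (pvPass u).1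
    rw [hk, ih,
        show ((PySem.Dict.counter u).items.map (·.1)) = (PySem.Dict.counter u).keys from rfl,
        PySem.Dict.keys_counter, List.dropLast_concat]
    rw [PySem.Set.update_eq_append_filter, PySem.Set.ofList_ofList]
    rcases List.eq_nil_or_concat u with hu | ⟨v, a, hva⟩
    · subst hu; rfl
    · rw [List.concat_eq_append] at hva
      subst hva
      rw [List.dropLast_concat, PySem.Set.ofList_append_singleton, PySem.Set.add_eq_ite]
      by_cases ha : a ∈ PySem.Set.ofList v
      · rw [if_pos ha]
        have h1 : (PySem.Set.ofList v).filter (fun y => !(PySem.Set.ofList v).contains y) = [] := by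
          apply List.filter_eq_nil_iff.mpr
          intro b hb
          simp [PySem.Set.contains_iff, hb]
        rw [h1, List.append_nil]
      · rw [if_neg ha, List.filter_append]
        have h1 : (PySem.Set.ofList v).filter (fun y => !(PySem.Set.ofList v).contains y) = [] := by
          apply List.filter_eq_nil_iff.mpr
          intro b hb
          simp [PySem.Set.contains_iff, hb]
        have h2 : ([a] : List String).filter (fun y => !(PySem.Set.ofList v).contains y) = [a] := by
          apply List.filter_eq_self.mpr
          intro b hb
          rw [List.mem_singleton] at hb
          subst hb
          simp [PySem.Set.contains_iff, ha]
        rw [h1, h2, List.nil_append]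

theorem pvPass_items (l : List String) :
    (pvPass l).1.items = (PySem.Set.ofList l.dropLast).map (fun x => (x, pvRow l x)) := by
  have hnd : (pvPass l).1.keys.Nodup := by
    rw [pvPass_fst_keys]; exact PySem.Set.nodup_ofList _
  rw [PySem.Dict.items_eq_map_keys _ hnd PySem.Dict.empty, pvPass_fst_keys]
  rfl

theorem pvRow_items (l : List String) (x : String) :
    (pvRow l x).items = (PySem.Set.ofList (pvAfter x l)).map (fun y => (y, pvP l (x, y))) := by
  have hnd : (pvRow l x).keys.Nodup := by
    rw [pvRow_keys]; exact PySem.Set.nodup_ofList _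
  rw [PySem.Dict.items_eq_map_keys _ hnd 0, pvRow_keys]
  exact List.map_congr_left (fun y _ => by rw [pvRow_getD])

-- ===== flush: nested insert folds = pvM over the flattened items =====

theorem pvInsMod (d : PySem.Dict (String × String) Int) (k : String × String) (m : Int)
    (h : d.keys.Nodup) : d.insert k (d.getD k 0 + m) = d.modify k 0 (· + m) := by
  have hnm : (d.modify k 0 (· + m)).keys.Nodup := by
    rw [PySem.Dict.keys_modify]
    exact PySem.Dict.nodup_keys_insert _ _ _ h
  have hni : (d.insert k (d.getD k 0 + m)).keys.Nodup := PySem.Dict.nodup_keys_insert _ _ _ h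
  apply PySem.Dict.ext
  have hkeys : (d.insert k (d.getD k 0 + m)).keys = (d.modify k 0 (· + m)).keys := by
    rw [PySem.Dict.keys_modify]
  rw [PySem.Dict.items_eq_map_keys _ hni 0, PySem.Dict.items_eq_map_keys _ hnm 0, hkeys]
  apply List.map_congr_left
  intro q _
  by_cases hq : q = k <;> simp [PySem.Dict.getD_insert, PySem.Dict.getD_modify, hq]

theorem pvFL1 : ∀ (s : List ((String × String) × Int)) (d : PySem.Dict (String × String) Int),
    d.keys.Nodup →
    s.foldl (fun d p => d.insert p.1 (d.getD p.1 0 + p.2)) d = pvM d s := by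
  intro s
  induction s with
  | nil => intro d _; rfl
  | cons p rest ih =>
    intro d h
    rw [List.foldl_cons, pvInsMod d p.1 p.2 h]
    have h2 : (d.modify p.1 0 (· + p.2)).keys.Nodup := by
      rw [PySem.Dict.keys_modify]
      exact PySem.Dict.nodup_keys_insert _ _ _ h
    rw [ih _ h2]
    rfl

theorem pvFlush : ∀ (rows : List (String × PySem.Dict String Int)) (d : PySem.Dict (String × String) Int),
    d.keys.Nodup →
    rows.foldl (fun prefs xr =>
        xr.2.items.foldl (fun prefs yc =>
          prefs.insert (xr.1, yc.1) (prefs.getD (xr.1, yc.1) 0 + yc.2)) prefs) d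
      = pvM d (rows.flatMap (fun xr => xr.2.items.map (fun yc => ((xr.1, yc.1), yc.2)))) := by
  intro rows
  induction rows with
  | nil => intro d _; rfl
  | cons xr rest ih =>
    intro d h
    rw [List.foldl_cons, List.flatMap_cons, pvM_append]
    have hinner : xr.2.items.foldl (fun prefs yc =>
        prefs.insert (xr.1, yc.1) (prefs.getD (xr.1, yc.1) 0 + yc.2)) d
        = pvM d (xr.2.items.map (fun yc => ((xr.1, yc.1), yc.2))) := by
      rw [← pvFL1 _ d h, List.foldl_map]
    rw [hinner, ih _ (pvM_nodup d _ h)]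

-- ===== the transpose fact: B's grouped key order = A's lexicographic key order =====

theorem pvFlatCongr {α β : Type} {g₁ g₂ : α → List β} :
    ∀ (u : List α), (∀ z ∈ u, g₁ z = g₂ z) → u.flatMap g₁ = u.flatMap g₂ := by
  intro u
  induction u with
  | nil => intro _; rfl
  | cons z zs ih =>
    intro h
    rw [List.flatMap_cons, List.flatMap_cons, h z List.mem_cons_self,
        ih (fun a ha => h a (List.mem_cons_of_mem z ha))]

theorem pvFilterFlat (x : String) (h : String → List String) :
    ∀ (u : List String),
      ((u.flatMap (fun z => (h z).map (fun y => (z, y)))).filter (fun p => ¬ (p.1 = x)))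
        = (u.filter (fun z => ¬ (z = x))).flatMap (fun z => (h z).map (fun y => (z, y))) := by
  intro u
  induction u with
  | nil => rfl
  | cons z zs ih =>
    rw [List.flatMap_cons, List.filter_append, ih]
    by_cases hz : z = x
    · have hblk : ((h z).map (fun y => (z, y))).filter (fun p => ¬ (p.1 = x)) = [] := by
        apply List.filter_eq_nil_iff.mpr
        intro p hp
        obtain ⟨y, _, he⟩ := List.mem_map.mp hp
        cases he
        simp [hz]
      rw [hblk, List.filter_cons_of_neg (by simpa using hz), List.nil_append]
    · have hblk : ((h z).map (fun y => (z, y))).filter (fun p => ¬ (p.1 = x)) = (h z).map (fun y => (z, y)) := by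
        apply List.filter_eq_self.mpr
        intro p hp
        obtain ⟨y, _, he⟩ := List.mem_map.mp hp
        cases he
        simpa using hz
      rw [hblk, List.filter_cons_of_pos (by simpa using hz), List.flatMap_cons]

theorem pvDiscard_filter (s : PySem.Set String) (x : String) :
    PySem.Set.discard s x = s.filter (fun z => ¬ (z = x)) := by
  unfold PySem.Set.discard
  apply List.filter_congr
  intro z _
  by_cases h : z = x
  · simp [h]
  · simp [h]

theorem pvFK_eq_LD : ∀ (l : List String), pvFK l = pvLD l := by
  intro l
  induction l with
  | nil => rfl
  | cons x xs ih =>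
    unfold pvFK pvLD
    cases xs with
    | nil => rfl
    | cons b bs =>
      have hdl : (x :: b :: bs).dropLast = x :: (b :: bs).dropLast := rfl
      rw [hdl, PySem.Set.ofList_cons, List.flatMap_cons]
      have hafter : pvAfter x (x :: b :: bs) = b :: bs := by unfold pvAfter; rw [if_pos rfl]
      rw [hafter]
      congr 1
      rw [pvDiscard_filter]
      have hcongr : ((PySem.Set.ofList (b :: bs).dropLast).filter (fun z => ¬ (z = x))).flatMap
            (fun z => (PySem.Set.ofList (pvAfter z (x :: b :: bs))).map (fun y => (z, y)))
          = ((PySem.Set.ofList (b :: bs).dropLast).filter (fun z => ¬ (z = x))).flatMap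
            (fun z => (PySem.Set.ofList (pvAfter z (b :: bs))).map (fun y => (z, y))) := by
        apply pvFlatCongr
        intro z hz
        have hzx : ¬ (z = x) := by
          have := List.of_mem_filter hz
          simpa using this
        have : pvAfter z (x :: b :: bs) = pvAfter z (b :: bs) := by
          show (if x = z then b :: bs else pvAfter z (b :: bs)) = _
          rw [if_neg (fun hc => hzx hc.symm)]
        rw [this]
      rw [hcongr, ← pvFilterFlat x (fun z => PySem.Set.ofList (pvAfter z (b :: bs)))]
      rw [← ih]
      rfl

theorem pvFK_mem_fst : ∀ (u : List String) (h : String → List String) (p : String × String),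
    p ∈ u.flatMap (fun z => (h z).map (fun y => (z, y))) → p.1 ∈ u := by
  intro u h p hp
  obtain ⟨z, hz, hin⟩ := List.mem_flatMap.mp hp
  obtain ⟨y, _, he⟩ := List.mem_map.mp hin
  cases he
  exact hz

theorem pvFlatNodup (h : String → List String) :
    ∀ (u : List String), u.Nodup → (∀ x, (h x).Nodup) →
      (u.flatMap (fun z => (h z).map (fun y => (z, y)))).Nodup := by
  intro u
  induction u with
  | nil => intro _ _; simp
  | cons z zs ih =>
    intro hnd hh
    rw [List.flatMap_cons]
    apply List.Nodup.append
    · exact (hh z).map (fun a b hab => by cases hab; rfl)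
    · exact ih (List.nodup_cons.mp hnd).2 hh
    · intro p hp hp2
      obtain ⟨y, _, he⟩ := List.mem_map.mp hp
      have h1 : p.1 = z := by cases he; rfl
      have h2 := pvFK_mem_fst zs h p hp2
      exact (List.nodup_cons.mp hnd).1 (h1 ▸ h2)

theorem pvFK_nodup (l : List String) : (pvFK l).Nodup := by
  unfold pvFK
  exact pvFlatNodup _ _ (PySem.Set.nodup_ofList _) (fun x => PySem.Set.nodup_ofList _)

-- ===== sums on the B side =====

theorem pvP_nonneg : ∀ (l : List String) (q : String × String), 0 ≤ pvP l q := by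
  intro l
  induction l with
  | nil => intro q; simp [pvP]
  | cons z zs ih =>
    intro q
    unfold pvP
    have := ih q
    split_ifs <;> positivity

theorem pvPZ : ∀ (l : List String) (q : String × String),
    pvP l q ≠ 0 → q.1 ∈ l.dropLast ∧ q.2 ∈ pvAfter q.1 l := by
  intro l
  induction l with
  | nil => intro q hq; simp [pvP] at hq
  | cons z zs ih =>
    intro q hq
    cases zs with
    | nil =>
      exfalso
      apply hq
      simp [pvP]
    | cons b bs =>
      unfold pvP at hq
      have h1 : 0 ≤ pvP (b :: bs) q := pvP_nonneg _ _
      by_cases hz : q.1 = z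
      · constructor
        · show q.1 ∈ z :: (b :: bs).dropLast
          rw [hz]; exact List.mem_cons_self
        · show q.2 ∈ (if z = q.1 then b :: bs else pvAfter q.1 (b :: bs))
          rw [if_pos hz.symm]
          by_cases hc : (b :: bs).count q.2 = 0
          · have hp : pvP (b :: bs) q ≠ 0 := by
              rw [if_pos hz, hc] at hq
              simpa using hq
            exact pvAfter_mem q.1 (b :: bs) q.2 (ih q hp).2
          · exact List.count_pos_iff.mp (Nat.pos_of_ne_zero hc)
      · rw [if_neg hz, zero_add] at hq
        obtain ⟨hm1, hm2⟩ := ih q hq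
        constructor
        · show q.1 ∈ z :: (b :: bs).dropLast
          exact List.mem_cons_of_mem z hm1
        · show q.2 ∈ (if z = q.1 then b :: bs else pvAfter q.1 (b :: bs))
          rw [if_neg (fun hc => hz hc.symm)]
          exact hm2

theorem pvSumSingle (q1 : String) (A : String → Int) :
    ∀ (u : List String), u.Nodup →
      (u.map (fun x => if q1 = x then A x else 0)).sum = if q1 ∈ u then A q1 else 0 := by
  intro u
  induction u with
  | nil => intro _; simp
  | cons z zs ih =>
    intro hnd
    rw [List.map_cons, List.sum_cons, ih (List.nodup_cons.mp hnd).2]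
    by_cases hz : q1 = z
    · subst hz
      rw [if_pos rfl, if_pos List.mem_cons_self, if_neg (List.nodup_cons.mp hnd).1, add_zero]
    · rw [if_neg hz, zero_add]
      by_cases hm : q1 ∈ zs
      · rw [if_pos hm, if_pos (List.mem_cons_of_mem z hm)]
      · rw [if_neg hm, if_neg (by rw [List.mem_cons]; push_neg; exact ⟨hz, hm⟩)]

theorem pvW_flatMap (g : String → List ((String × String) × Int)) (q : String × String) :
    ∀ (u : List String), pvW (u.flatMap g) q = (u.map (fun x => pvW (g x) q)).sum := by
  intro u
  induction u with
  | nil => simp [pvW]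
  | cons z zs ih => rw [List.flatMap_cons, pvW_append, ih, List.map_cons, List.sum_cons]

theorem pvW_block (l : List String) (x : String) (q : String × String) :
    pvW ((PySem.Set.ofList (pvAfter x l)).map (fun y => ((x, y), pvP l (x, y)))) q
      = if q.1 = x then (if q.2 ∈ PySem.Set.ofList (pvAfter x l) then pvP l (x, q.2) else 0) else 0 := by
  obtain ⟨q1, q2⟩ := q
  unfold pvW
  rw [List.filter_map, List.map_map]
  by_cases h1 : q1 = x
  · subst h1
    rw [if_pos rfl]
    have hpre : ((fun p : (String × String) × Int => decide (p.1 = (q1, q2))) ∘ (fun y => ((q1, y), pvP l (q1, y))))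
        = fun y => decide (y = q2) := by
      funext y
      simp [Function.comp, Prod.mk.injEq]
    rw [hpre, pvFilterNodup q2 _ (PySem.Set.nodup_ofList _)]
    by_cases hm : q2 ∈ PySem.Set.ofList (pvAfter q1 l)
    · rw [if_pos hm, if_pos hm]
      simp
    · rw [if_neg hm, if_neg hm]
      simp
  · rw [if_neg h1]
    have hnil : (PySem.Set.ofList (pvAfter x l)).filter
        ((fun p : (String × String) × Int => decide (p.1 = (q1, q2))) ∘ (fun y => ((x, y), pvP l (x, y)))) = [] := by
      apply List.filter_eq_nil_iff.mpr
      intro y _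
      simp only [Function.comp, decide_eq_true_eq, Prod.mk.injEq]
      rintro ⟨ha, hb⟩
      exact h1 ha.symm
    rw [hnil]
    simp

theorem pvW_FKV (l : List String) (q : String × String) : pvW (pvFKV l) q = pvP l q := by
  unfold pvFKV
  rw [pvW_flatMap]
  have hmap : ((PySem.Set.ofList l.dropLast).map
      (fun x => pvW ((PySem.Set.ofList (pvAfter x l)).map (fun y => ((x, y), pvP l (x, y)))) q))
      = ((PySem.Set.ofList l.dropLast).map
        (fun x => if q.1 = x then (if q.2 ∈ PySem.Set.ofList (pvAfter x l) then pvP l (x, q.2) else 0) else 0)) := by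
    apply List.map_congr_left
    intro x _
    rw [pvW_block]
  rw [hmap, pvSumSingle _ _ _ (PySem.Set.nodup_ofList _)]
  by_cases h1 : q.1 ∈ PySem.Set.ofList l.dropLast
  · rw [if_pos h1]
    by_cases h2 : q.2 ∈ PySem.Set.ofList (pvAfter q.1 l)
    · rw [if_pos h2]
    · rw [if_neg h2]
      by_contra hne
      have := pvPZ l q (fun hc => hne (by rw [hc]))
      exact h2 ((PySem.Set.mem_ofList _ _).mpr this.2)
  · rw [if_neg h1]
    by_contra hne
    have := pvPZ l q (fun hc => hne (by rw [hc]))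
    exact h1 ((PySem.Set.mem_ofList _ _).mpr this.1)

-- ===== per-ballot equality and assembly =====

theorem pvFKV_keys (l : List String) : (pvFKV l).map (·.1) = pvFK l := by
  unfold pvFKV pvFK
  rw [List.map_flatMap]
  apply pvFlatCongr
  intro x _
  rw [List.map_map]
  rfl

theorem pvStepB (cands : List String) (ballot : List String) (d : PySem.Dict (String × String) Int)
    (hd : d.keys.Nodup) :
    ((ballot.foldl (fun rs c =>
        if ¬ (PySem.Set.contains (PySem.Set.ofList cands) c = true) then rs
        else
          ( rs.2.items.foldl (fun rows xm =>
              rows.modify xm.1 PySem.Dict.empty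
                (fun r => r.insert c (r.getD c 0 + xm.2))) rs.1,
            rs.2.insert c (rs.2.getD c 0 + 1) ))
        ((PySem.Dict.empty : PySem.Dict String (PySem.Dict String Int)), (PySem.Dict.empty : PySem.Dict String Int))).1.items.foldl
      (fun prefs xr =>
        xr.2.items.foldl (fun prefs yc =>
          prefs.insert (xr.1, yc.1) (prefs.getD (xr.1, yc.1) 0 + yc.2)) prefs) d)
      = pvM d (pvFKV (ballot.filter (fun c => cands.contains c))) := by
  have hfold : ballot.foldl (fun rs c =>
        if ¬ (PySem.Set.contains (PySem.Set.ofList cands) c = true) then rs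
        else
          ( rs.2.items.foldl (fun rows xm =>
              rows.modify xm.1 PySem.Dict.empty
                (fun r => r.insert c (r.getD c 0 + xm.2))) rs.1,
            rs.2.insert c (rs.2.getD c 0 + 1) ))
        ((PySem.Dict.empty : PySem.Dict String (PySem.Dict String Int)), (PySem.Dict.empty : PySem.Dict String Int))
      = pvPass (ballot.filter (fun c => cands.contains c)) := by
    unfold pvPass
    simp only [ite_not]
    rw [PySem.List.foldl_ite_eq_foldl_filter
        (fun c => PySem.Set.contains (PySem.Set.ofList cands) c = true)
        (fun (rs : PySem.Dict String (PySem.Dict String Int) × PySem.Dict String Int) (c : String) =>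
          ( rs.2.items.foldl (fun rows xm =>
              rows.modify xm.1 PySem.Dict.empty
                (fun r => r.insert c (r.getD c 0 + xm.2))) rs.1,
            rs.2.insert c (rs.2.getD c 0 + 1) )) ballot
        ((PySem.Dict.empty : PySem.Dict String (PySem.Dict String Int)), (PySem.Dict.empty : PySem.Dict String Int))]
    have hfil : (ballot.filter (fun c => decide (PySem.Set.contains (PySem.Set.ofList cands) c = true)))
        = ballot.filter (fun c => cands.contains c) := by
      apply List.filter_congr
      intro c _
      have hc : PySem.Set.contains (PySem.Set.ofList cands) c = cands.contains c := by
        by_cases hm : c ∈ cands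
        · rw [(PySem.Set.contains_iff _ _).mpr ((PySem.Set.mem_ofList cands c).mpr hm)]
          simp [hm]
        · have h1 : PySem.Set.contains (PySem.Set.ofList cands) c = false := by
            rw [← Bool.not_eq_true]
            exact fun hcc => hm ((PySem.Set.mem_ofList cands c).mp ((PySem.Set.contains_iff _ _).mp hcc))
          rw [h1]
          symm
          rw [← Bool.not_eq_true]
          simp [hm]
      rw [hc]
      simp
    rw [hfil]
    rfl
  rw [hfold, pvFlush _ d hd, pvPass_items]
  congr 1
  rw [List.flatMap_map]
  unfold pvFKV
  apply pvFlatCongr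
  intro x _
  show ((pvRow _ x).items.map (fun yc => ((x, yc.1), yc.2))) = _
  rw [pvRow_items, List.map_map]
  rfl

theorem pvBallot (cands : List String) (ballot : List String) (d : PySem.Dict (String × String) Int)
    (hd : d.keys.Nodup) :
    pvM d (pvSeqA (ballot.filter (fun c => cands.contains c)))
      = pvM d (pvFKV (ballot.filter (fun c => cands.contains c))) := by
  apply pvAgg d _ _ hd
  · have h1 : PySem.Set.ofList (pvFK (ballot.filter (fun c => cands.contains c)))
        = pvFK (ballot.filter (fun c => cands.contains c)) :=
      PySem.Set.ofList_eq_self_of_nodup _ (pvFK_nodup (ballot.filter (fun c => cands.contains c)))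
    rw [pvSeqA_keys, pvFKV_keys, h1, pvFK_eq_LD]
  · intro q
    rw [pvW_seqA, pvW_FKV]

theorem pvFoldCong {σ : Type} (fA fB : σ → List String → σ) (P : σ → Prop)
    (hstep : ∀ d b, P d → fA d b = fB d b)
    (hpres : ∀ d b, P d → P (fA d b)) :
    ∀ (bs : List (List String)) (d : σ), P d → bs.foldl fA d = bs.foldl fB d := by
  intro bs
  induction bs with
  | nil => intro d _; rfl
  | cons b rest ih =>
    intro d hd
    rw [List.foldl_cons, List.foldl_cons, ← hstep d b hd]
    exact ih _ (hpres d b hd)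

-- ===== VERDICT (by name: the statement is the Claim_ definition above) =====
theorem build_preference_matrix_py_spec : Claim_equal_build_preference_matrix_py := by
  intro ballots candidates _
  unfold Spec_build_preference_matrix_py build_preference_matrix_py build_preference_matrix_py_alt
  dsimp only
  apply congrArg (fun dd : PySem.Dict (String × String) Int => dd.items.map (fun p => (p.1.1, p.1.2, p.2)))
  refine pvFoldCong _ _ (fun d : PySem.Dict (String × String) Int => d.keys.Nodup) ?_ ?_ ballots
    PySem.Dict.empty PySem.Dict.nodup_keys_empty
  · intro d b hd
    dsimp only
    rw [pvStepA, pvPf_eq_M, pvBallot candidates b d hd]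
    exact (pvStepB candidates b d hd).symm
  · intro d b hd
    dsimp only
    rw [pvStepA, pvPf_eq_M]
    exact pvM_nodup d _ hd
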